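-- pv_equiv track=rewrite | github.com/liampshaw/mobile-gene-regions | scripts/compute_breakpoint_distance_blocks.py | blocksFirstBreakpoint
-- ===== SOURCE A (Python) =====
-- def blocksFirstBreakpoint(a, b, starting_block, upstream=True):
--     """a, b are lists of blocks. returns the blocks up until the first breakpoint"""
--     a_start = a.index(starting_block)
--     b_start = b.index(starting_block)
--     shared_blocks = []
--     if upstream==False:
--         i = 0
--         while i<len(a)-a_start-1 and i<len(b)-b_start-1:
--             i += 1
--             if b_start<len(b):
--                 if a[i+a_start]==b[b_start+i]:
--                     shared_blocks.append(b[b_start+i])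
--                 else:
--                     #if a[i+a_start] in shared_blocks: # append the block if it's a duplicated pre-existing one
--                     #    shared_blocks.append(a[i+a_start]) # this means duplications 'don't count'
--                     break
--     elif upstream==True:
--         i = 0
--         while a_start-i > 0 and b_start-i > 0:
--             i = i+1
--             if a[a_start-i]==b[b_start-i]:
--                 shared_blocks.append(b[b_start-i])
--             else:
--                 #if a[a_start+i] in shared_blocks:
--                 #    shared_blocks.append(a[a_start+i])
--                 break
--     return(shared_blocks)
-- ===== SOURCE B (Python) =====
-- def blocksFirstBreakpoint(a, b, starting_block, upstream=True):
--     """a, b are lists of blocks. returns the blocks up until the first breakpoint"""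
--     a_start = a.index(starting_block)
--     b_start = b.index(starting_block)
--     if upstream:
--         a_seq = a[a_start-1::-1] if a_start > 0 else []
--         b_seq = b[b_start-1::-1] if b_start > 0 else []
--     else:
--         a_seq = a[a_start+1:]
--         b_seq = b[b_start+1:]
--     shared_blocks = []
--     for x, y in zip(a_seq, b_seq):
--         if x != y:
--             break
--         shared_blocks.append(y)
--     return shared_blocks
-- ===== Notes on version B (the rewrite author's own statement) =====
-- stated objective: simpler
-- what changed: Replaces A's two index-arithmetic while loops with slicing into two walking-order sequences (suffixes, or reversed prefixes) and one zip loop that collects while elements are equal.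
import Mathlib
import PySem

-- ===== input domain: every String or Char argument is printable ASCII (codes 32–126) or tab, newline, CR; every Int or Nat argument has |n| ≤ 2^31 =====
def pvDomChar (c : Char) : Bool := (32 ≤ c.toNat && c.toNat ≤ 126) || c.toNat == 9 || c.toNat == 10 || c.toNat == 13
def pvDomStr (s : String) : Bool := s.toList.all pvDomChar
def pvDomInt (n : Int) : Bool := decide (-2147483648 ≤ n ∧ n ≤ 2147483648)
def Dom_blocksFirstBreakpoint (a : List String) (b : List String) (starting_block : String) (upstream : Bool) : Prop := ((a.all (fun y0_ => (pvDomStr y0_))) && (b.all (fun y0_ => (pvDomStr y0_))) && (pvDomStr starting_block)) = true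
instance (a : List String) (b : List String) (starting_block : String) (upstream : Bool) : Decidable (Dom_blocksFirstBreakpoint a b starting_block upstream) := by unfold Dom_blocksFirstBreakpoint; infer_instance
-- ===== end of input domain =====

-- ===== PORT A =====
-- B rewrites A's two index-arithmetic while loops as slices plus one zip walk (objective: simpler).
-- Pre_ excludes inputs where list.index raises ValueError (starting_block missing from a or b).
-- A's downstream loop: i advances while in both ranges; indices are guaranteed in range by the
-- loop condition, so pyGetD with default "" is exact here.
def pvLoopDown (a b : List String) (as_ bs_ : Nat) (i : Nat) (acc : List String) : List String :=
  if h : i < a.length - as_ - 1 ∧ i < b.length - bs_ - 1 then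
    -- i += 1 (inlined as i + 1 below)
    if bs_ < b.length then
      if PySem.List.pyGetD a ((i + 1 + as_ : Nat) : Int) "" = PySem.List.pyGetD b ((bs_ + (i + 1) : Nat) : Int) "" then
        pvLoopDown a b as_ bs_ (i + 1) (acc ++ [PySem.List.pyGetD b ((bs_ + (i + 1) : Nat) : Int) ""])
      else acc
    else pvLoopDown a b as_ bs_ (i + 1) acc
  else acc
termination_by a.length - as_ - 1 - i
decreasing_by all_goals omega

-- A's upstream loop: a_start - i stays ≥ 0 while the loop runs, so Nat subtraction is exact.
def pvLoopUp (a b : List String) (as_ bs_ : Nat) (i : Nat) (acc : List String) : List String :=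
  if h : as_ - i > 0 ∧ bs_ - i > 0 then
    -- i = i + 1 (inlined as i + 1 below)
    if PySem.List.pyGetD a ((as_ - (i + 1) : Nat) : Int) "" = PySem.List.pyGetD b ((bs_ - (i + 1) : Nat) : Int) "" then
      pvLoopUp a b as_ bs_ (i + 1) (acc ++ [PySem.List.pyGetD b ((bs_ - (i + 1) : Nat) : Int) ""])
    else acc
  else acc
termination_by as_ - i
decreasing_by omega

def blocksFirstBreakpoint (a : List String) (b : List String) (starting_block : String) (upstream : Bool) : List String :=
  match PySem.List.index? a starting_block, PySem.List.index? b starting_block with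
  | some a_start, some b_start =>
      if upstream = false then pvLoopDown a b a_start b_start 0 []
      else pvLoopUp a b a_start b_start 0 []
  | _, _ => []  -- Python raises ValueError here; outside Pre_

-- ===== PORT B =====
-- B's single zip loop: collect y while pairs are equal, break at first mismatch.
def pvTakeShared : List String → List String → List String
  | x :: xs, y :: ys => if x ≠ y then [] else y :: pvTakeShared xs ys
  | _, _ => []

-- slices: a[a_start+1:] = drop (a_start+1); a[a_start-1::-1] (a_start>0) = (take a_start).reverse — exact.
def blocksFirstBreakpoint_alt (a : List String) (b : List String) (starting_block : String) (upstream : Bool) : List String :=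
  match PySem.List.index? a starting_block with
  | none => []  -- Python raises ValueError here; outside Pre_
  | some a_start =>
    match PySem.List.index? b starting_block with
    | none => []  -- Python raises ValueError here; outside Pre_
    | some b_start =>
      let a_seq := if upstream then (if a_start > 0 then (a.take a_start).reverse else []) else a.drop (a_start + 1)
      let b_seq := if upstream then (if b_start > 0 then (b.take b_start).reverse else []) else b.drop (b_start + 1)
      pvTakeShared a_seq b_seq

-- ===== PRECONDITION & SPEC =====
-- Pre_ excludes exactly the inputs where A raises ValueError (starting_block not in a or not in b).
def Pre_blocksFirstBreakpoint (a : List String) (b : List String) (starting_block : String) (upstream : Bool) : Prop :=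
  starting_block ∈ a ∧ starting_block ∈ b
instance (a : List String) (b : List String) (starting_block : String) (upstream : Bool) : Decidable (Pre_blocksFirstBreakpoint a b starting_block upstream) := by unfold Pre_blocksFirstBreakpoint; infer_instance

def pvWitness_blocksFirstBreakpoint : List String × List String × String × Bool :=
  (["u", "x", "y"], ["v", "x", "y"], "x", true)

def Spec_blocksFirstBreakpoint (a : List String) (b : List String) (starting_block : String) (upstream : Bool) (out : List String) : Prop := out = blocksFirstBreakpoint_alt a b starting_block upstream
instance (a : List String) (b : List String) (starting_block : String) (upstream : Bool) (out : List String) : Decidable (Spec_blocksFirstBreakpoint a b starting_block upstream out) := by unfold Spec_blocksFirstBreakpoint; infer_instance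

-- ===== CLAIM (what is proved, stated in full; the proofs are below) =====
def Claim_equal_blocksFirstBreakpoint : Prop := ∀ (a : List String) (b : List String) (starting_block : String) (upstream : Bool), Dom_blocksFirstBreakpoint a b starting_block upstream → Pre_blocksFirstBreakpoint a b starting_block upstream → Spec_blocksFirstBreakpoint a b starting_block upstream (blocksFirstBreakpoint a b starting_block upstream)

-- ===== LEMMAS AND PROOFS =====
lemma pvGetIdx (l : List String) (n : Nat) (h : n < l.length) :
    PySem.List.pyGetD l (n : Int) "" = l[n] := by
  rw [PySem.List.pyGetD_natCast]; exact List.getD_eq_getElem l _ h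

lemma pvTakeRev (l : List String) (n : Nat) (h : n < l.length) :
    (l.take (n + 1)).reverse = l[n] :: (l.take n).reverse := by
  rw [List.take_add_one]; simp [List.getElem?_eq_getElem h]

lemma pvTakeSharedNilRight (xs : List String) : pvTakeShared xs [] = [] := by
  cases xs <;> simp [pvTakeShared]

lemma pvLoopDown_eq (a b : List String) (as_ bs_ : Nat) :
    ∀ i acc, pvLoopDown a b as_ bs_ i acc = acc ++ pvTakeShared (a.drop (as_ + 1 + i)) (b.drop (bs_ + 1 + i)) := by
  intro i acc
  fun_induction pvLoopDown a b as_ bs_ i acc with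
  | case1 i acc hc hbs heq ih =>
      have hia : as_ + 1 + i < a.length := by omega
      have hib : bs_ + 1 + i < b.length := by omega
      have ea : PySem.List.pyGetD a ((i + 1 + as_ : Nat) : Int) "" = a[as_ + 1 + i] := by
        rw [show i + 1 + as_ = as_ + 1 + i from by omega]; exact pvGetIdx a _ hia
      have eb : PySem.List.pyGetD b ((bs_ + (i + 1) : Nat) : Int) "" = b[bs_ + 1 + i] := by
        rw [show bs_ + (i + 1) = bs_ + 1 + i from by omega]; exact pvGetIdx b _ hib
      rw [ea, eb] at heq
      rw [ih, List.drop_eq_getElem_cons hia, List.drop_eq_getElem_cons hib, eb]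
      simp [pvTakeShared, heq, show as_ + 1 + (i + 1) = as_ + 1 + i + 1 from by omega,
        show bs_ + 1 + (i + 1) = bs_ + 1 + i + 1 from by omega]
  | case2 i acc hc hbs heq =>
      have hia : as_ + 1 + i < a.length := by omega
      have hib : bs_ + 1 + i < b.length := by omega
      have ea : PySem.List.pyGetD a ((i + 1 + as_ : Nat) : Int) "" = a[as_ + 1 + i] := by
        rw [show i + 1 + as_ = as_ + 1 + i from by omega]; exact pvGetIdx a _ hia
      have eb : PySem.List.pyGetD b ((bs_ + (i + 1) : Nat) : Int) "" = b[bs_ + 1 + i] := by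
        rw [show bs_ + (i + 1) = bs_ + 1 + i from by omega]; exact pvGetIdx b _ hib
      rw [ea, eb] at heq
      rw [List.drop_eq_getElem_cons hia, List.drop_eq_getElem_cons hib]
      simp [pvTakeShared, heq]
  | case3 i acc hc hbs ih => exact absurd (show bs_ < b.length by omega) hbs
  | case4 i acc hc =>
      have h : a.length ≤ as_ + 1 + i ∨ b.length ≤ bs_ + 1 + i := by omega
      rcases h with h | h
      · rw [List.drop_eq_nil_of_le h]; simp [pvTakeShared]
      · rw [List.drop_eq_nil_of_le h, pvTakeSharedNilRight]; simp

lemma pvLoopUp_eq (a b : List String) (as_ bs_ : Nat) (ha : as_ ≤ a.length) (hb : bs_ ≤ b.length) :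
    ∀ i acc, pvLoopUp a b as_ bs_ i acc = acc ++ pvTakeShared ((a.take (as_ - i)).reverse) ((b.take (bs_ - i)).reverse) := by
  intro i acc
  fun_induction pvLoopUp a b as_ bs_ i acc with
  | case1 i acc hc heq ih =>
      have hia : as_ - (i + 1) < a.length := by omega
      have hib : bs_ - (i + 1) < b.length := by omega
      have ea := pvGetIdx a _ hia
      have eb := pvGetIdx b _ hib
      rw [ea, eb] at heq
      rw [ih, show as_ - i = (as_ - (i + 1)) + 1 from by omega,
        show bs_ - i = (bs_ - (i + 1)) + 1 from by omega,
        pvTakeRev a _ hia, pvTakeRev b _ hib, eb]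
      simp [pvTakeShared, heq]
  | case2 i acc hc heq =>
      have hia : as_ - (i + 1) < a.length := by omega
      have hib : bs_ - (i + 1) < b.length := by omega
      rw [pvGetIdx a _ hia, pvGetIdx b _ hib] at heq
      rw [show as_ - i = (as_ - (i + 1)) + 1 from by omega,
        show bs_ - i = (bs_ - (i + 1)) + 1 from by omega,
        pvTakeRev a _ hia, pvTakeRev b _ hib]
      simp [pvTakeShared, heq]
  | case3 i acc hc =>
      have h : as_ - i = 0 ∨ bs_ - i = 0 := by omega
      rcases h with h | h
      · rw [h]; simp [pvTakeShared]
      · rw [h]; simp [pvTakeSharedNilRight]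

-- ===== VERDICT (by name: the statement is the Claim_ definition above) =====
theorem blocksFirstBreakpoint_spec : Claim_equal_blocksFirstBreakpoint := by
  intro a b s up _ hpre
  obtain ⟨ha, hb⟩ := hpre
  obtain ⟨ka, hka⟩ := Option.isSome_iff_exists.mp ((PySem.List.index?_isSome_iff (xs := a) (v := s)).mpr ha)
  obtain ⟨kb, hkb⟩ := Option.isSome_iff_exists.mp ((PySem.List.index?_isSome_iff (xs := b) (v := s)).mpr hb)
  obtain ⟨hla, -, -⟩ := PySem.List.getElem_of_index?_eq_some hka
  obtain ⟨hlb, -, -⟩ := PySem.List.getElem_of_index?_eq_some hkb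
  unfold Spec_blocksFirstBreakpoint blocksFirstBreakpoint blocksFirstBreakpoint_alt
  rw [hka, hkb]
  cases up with
  | false =>
      simp only [pvLoopDown_eq, List.nil_append, if_true, reduceCtorEq]
      simp
  | true =>
      simp only [pvLoopUp_eq a b ka kb (le_of_lt hla) (le_of_lt hlb), List.nil_append]
      simp only [Nat.sub_zero, reduceIte]
      rcases Nat.eq_zero_or_pos ka with h0 | h0 <;> rcases Nat.eq_zero_or_pos kb with h1 | h1 <;>
        simp [h0, h1, pvTakeShared]
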